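-- pv_equiv track=rewrite | github.com/AppliedIR/sift-mcp | packages/forensic-mcp/src/forensic_mcp/case/manager.py | _extract_iocs
-- ===== SOURCE A (Python) =====
-- def _extract_iocs(findings: list[dict]) -> dict[str, list[str]]:
--     """Aggregate IOCs from approved findings into {type: [values]}."""
--     iocs: dict[str, list[str]] = {}
--     for f in findings:
--         for ioc in f.get("iocs", []):
--             ioc_type = ioc.get("type", "unknown")
--             ioc_value = ioc.get("value", "")
--             if ioc_value:
--                 iocs.setdefault(ioc_type, [])
--                 if ioc_value not in iocs[ioc_type]:
--                     iocs[ioc_type].append(ioc_value)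
--     return iocs
-- ===== SOURCE B (Python) =====
-- def _extract_iocs(findings: list[dict]) -> dict[str, list[str]]:
--     """Aggregate IOCs from approved findings into {type: [values]}.
--
--     Flatten-then-group: build one flat list of (type, value) pairs with empty
--     values dropped, take the first-seen-ordered list of types, and for each
--     type dedup its values with dict.fromkeys (first-seen order).
--     """
--     pairs = [
--         (ioc.get("type", "unknown"), ioc.get("value", ""))
--         for f in findings
--         for ioc in f.get("iocs", [])
--         if ioc.get("value", "")
--     ]
--     types = list(dict.fromkeys(t for t, _ in pairs))
--     return {t: list(dict.fromkeys(v for u, v in pairs if u == t)) for t in types}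
-- ===== Notes on version B (the rewrite author's own statement) =====
-- stated objective: alternative
-- what changed: Replaces A's incremental dict-of-unique-lists (setdefault + membership scan per ioc) by a flatten-then-group approach: one flat list of non-empty (type, value) pairs, the first-seen-ordered type list, and a per-type filter + dict.fromkeys dedup to build each bucket.
import Mathlib
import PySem

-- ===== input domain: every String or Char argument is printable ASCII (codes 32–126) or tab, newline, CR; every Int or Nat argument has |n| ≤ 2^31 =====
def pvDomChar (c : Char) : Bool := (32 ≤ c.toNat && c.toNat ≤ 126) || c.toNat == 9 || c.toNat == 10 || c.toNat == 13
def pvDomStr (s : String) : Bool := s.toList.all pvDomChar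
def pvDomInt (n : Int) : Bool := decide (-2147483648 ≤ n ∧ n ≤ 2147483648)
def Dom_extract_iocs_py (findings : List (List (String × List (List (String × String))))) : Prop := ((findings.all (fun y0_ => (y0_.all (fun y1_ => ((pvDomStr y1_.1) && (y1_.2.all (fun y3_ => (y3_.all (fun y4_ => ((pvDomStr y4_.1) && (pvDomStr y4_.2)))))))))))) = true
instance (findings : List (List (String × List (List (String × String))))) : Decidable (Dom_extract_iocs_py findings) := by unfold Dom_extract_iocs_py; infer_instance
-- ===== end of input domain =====

-- B replaces A's incremental dict of unique lists by flatten-then-group: a flat list of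
-- non-empty (type, value) pairs, the first-seen type list, a per-type filter + dedup.

-- ===== PORT A =====
-- one ioc of A's inner loop: setdefault, then append if the value is not yet present
def pvAStep (d : PySem.Dict String (List String)) (ioc : List (String × String)) :
    PySem.Dict String (List String) :=
  let ioc_type := (PySem.Dict.mk ioc).getD "type" "unknown"
  let ioc_value := (PySem.Dict.mk ioc).getD "value" ""
  if ioc_value = "" then d
  else
    let d1 := d.setdefault ioc_type []
    -- after setdefault the key is present, so Python's iocs[ioc_type] is total: getD is exact
    if ioc_value ∈ d1.getD ioc_type [] then d1
    else d1.insert ioc_type (d1.getD ioc_type [] ++ [ioc_value])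

def extract_iocs_py (findings : List (List (String × List (List (String × String))))) :
    List (String × List String) :=
  (findings.foldl
      (fun d f => ((PySem.Dict.mk f).getD "iocs" []).foldl pvAStep d)
      PySem.Dict.empty).items

-- ===== PORT B =====
def extract_iocs_py_alt (findings : List (List (String × List (List (String × String))))) :
    List (String × List String) :=
  -- pairs = [(ioc.get("type","unknown"), ioc.get("value","")) for f in findings
  --          for ioc in f.get("iocs", []) if ioc.get("value","")]
  let pairs :=
    (findings.flatMap (fun f => (PySem.Dict.mk f).getD "iocs" [])).filterMap
      (fun ioc =>
        let t := (PySem.Dict.mk ioc).getD "type" "unknown"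
        let v := (PySem.Dict.mk ioc).getD "value" ""
        if v = "" then none else some (t, v))
  -- types = list(dict.fromkeys(t for t, _ in pairs))
  let types := PySem.List.dedup (pairs.map Prod.fst)
  -- {t: list(dict.fromkeys(v for u, v in pairs if u == t)) for t in types}
  types.map (fun t =>
    (t, PySem.List.dedup ((pairs.filter (fun q => q.1 == t)).map Prod.snd)))

-- ===== PRECONDITION & SPEC =====
def Spec_extract_iocs_py (findings : List (List (String × List (List (String × String))))) (out : List (String × List String)) : Prop := out = extract_iocs_py_alt findings
instance (findings : List (List (String × List (List (String × String))))) (out : List (String × List String)) : Decidable (Spec_extract_iocs_py findings out) := by unfold Spec_extract_iocs_py; infer_instance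

-- ===== CLAIM (what is proved, stated in full; the proofs are below) =====
def Claim_equal_extract_iocs_py : Prop := ∀ (findings : List (List (String × List (List (String × String))))), Dom_extract_iocs_py findings → Spec_extract_iocs_py findings (extract_iocs_py findings)

-- ===== LEMMAS AND PROOFS =====

-- A's step seen on the extracted (type, value) pair
def pvPairStep (d : PySem.Dict String (List String)) (q : String × String) :
    PySem.Dict String (List String) :=
  if q.2 = "" then d
  else
    let d1 := d.setdefault q.1 []
    if q.2 ∈ d1.getD q.1 [] then d1
    else d1.insert q.1 (d1.getD q.1 [] ++ [q.2])

def pvTV (ioc : List (String × String)) : String × String :=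
  ((PySem.Dict.mk ioc).getD "type" "unknown", (PySem.Dict.mk ioc).getD "value" "")

-- what B computes from a flat pair list
def pvSpec (P : List (String × String)) : List (String × List String) :=
  (PySem.List.dedup (P.map Prod.fst)).map (fun t =>
    (t, PySem.List.dedup ((P.filter (fun q => q.1 == t)).map Prod.snd)))

theorem pvFoldFlat {α β δ : Type} (g : α → List β) (h : δ → β → δ) (fs : List α) (d : δ) :
    fs.foldl (fun d f => (g f).foldl h d) d = (fs.flatMap g).foldl h d := by
  induction fs generalizing d with
  | nil => rfl
  | cons f fs ih => simp [List.flatMap_cons, List.foldl_append, ih]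

theorem pvFilterMap_eq (L : List (List (String × String))) :
    L.filterMap
      (fun ioc =>
        let t := (PySem.Dict.mk ioc).getD "type" "unknown"
        let v := (PySem.Dict.mk ioc).getD "value" ""
        if v = "" then none else some (t, v))
    = (L.map pvTV).filter (fun q => !(q.2 == "")) := by
  induction L with
  | nil => rfl
  | cons x xs ih =>
      simp only [List.filterMap_cons, List.map_cons, List.filter_cons, pvTV]
      by_cases hv : (PySem.Dict.mk x).getD "value" "" = ""
      · simp [hv, ih]
      · simp [hv, ih]

-- the invariant step: one non-empty pair appended on the spec side
theorem pvStep (Q : List (String × String)) (t v : String) (hv : v ≠ "")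
    (d : PySem.Dict String (List String))
    (hitems : d.items = pvSpec Q) :
    (pvPairStep d (t, v)).items = pvSpec (Q ++ [(t, v)]) := by
  have hkeys : d.keys = PySem.List.dedup (Q.map Prod.fst) := by
    simp only [PySem.Dict.keys, hitems, pvSpec, List.map_map]
    exact List.map_id _
  have hnd : d.keys.Nodup := by
    rw [hkeys]; simp only [PySem.List.dedup_eq_ofList]; exact PySem.Set.nodup_ofList _
  have hfst : ((Q ++ [(t, v)]).map Prod.fst) = Q.map Prod.fst ++ [t] := by simp
  unfold pvPairStep
  simp only [hv, if_false]
  by_cases hc : d.contains t = true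
  · -- t already a key
    have htK : t ∈ PySem.List.dedup (Q.map Prod.fst) := by
      rw [← hkeys]; exact (PySem.Dict.contains_iff_mem_keys _ _).mp hc
    have hset : d.setdefault t [] = d := PySem.Dict.setdefault_of_contains _ _ hc
    have hmem : (t, PySem.List.dedup ((Q.filter (fun q => q.1 == t)).map Prod.snd)) ∈ d.items := by
      rw [hitems]; exact List.mem_map.mpr ⟨t, htK, rfl⟩
    have hgd : d.getD t [] = PySem.List.dedup ((Q.filter (fun q => q.1 == t)).map Prod.snd) :=
      PySem.Dict.getD_of_mem_items _ hmem hnd []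
    have hkeys' : PySem.List.dedup ((Q ++ [(t, v)]).map Prod.fst)
        = PySem.List.dedup (Q.map Prod.fst) := by
      simp only [hfst, PySem.List.dedup_eq_ofList, PySem.Set.ofList_append_singleton]
      exact PySem.Set.add_of_mem (by simpa [PySem.List.dedup_eq_ofList] using htK)
    by_cases hvm : v ∈ d.getD t []
    · -- duplicate value: dict unchanged, spec unchanged
      simp only [hset, hvm, if_true, hitems, pvSpec, hkeys']
      refine List.map_congr_left (fun u hu => ?_)
      by_cases hut : u = t
      · subst hut
        have hvQ : v ∈ (Q.filter (fun q => q.1 == u)).map Prod.snd := by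
          have := hvm; rw [hgd] at this
          simpa [PySem.List.dedup_eq_ofList, PySem.Set.mem_ofList] using this
        congr 1
        simp only [List.filter_append, List.filter_cons, List.filter_nil,
          beq_self_eq_true, if_true, List.map_append, List.map_cons, List.map_nil,
          PySem.List.dedup_eq_ofList, PySem.Set.ofList_append_singleton]
        exact (PySem.Set.add_of_mem (by simpa [PySem.Set.mem_ofList] using hvQ)).symm
      · congr 2
        simp [List.filter_append,
          show ¬ (t == u) = true by simpa using fun h => hut (by simpa using h.symm)]
    · -- new value under an existing key
      simp only [hset, hvm, if_false]
      rw [PySem.Dict.items_insert_of_contains _ _ hc, hitems]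
      simp only [pvSpec, hkeys', List.map_map]
      refine List.map_congr_left (fun u hu => ?_)
      by_cases hut : u = t
      · subst hut
        have hvQ : v ∉ (Q.filter (fun q => q.1 == u)).map Prod.snd := by
          intro hmm; exact hvm (by rw [hgd]; simpa [PySem.List.dedup_eq_ofList, PySem.Set.mem_ofList] using hmm)
        simp only [Function.comp, beq_self_eq_true, if_true, hgd]
        congr 1
        simp only [List.filter_append, List.filter_cons, List.filter_nil,
          beq_self_eq_true, if_true, List.map_append, List.map_cons, List.map_nil,
          PySem.List.dedup_eq_ofList, PySem.Set.ofList_append_singleton]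
        exact (PySem.Set.add_of_not_mem (by simpa [PySem.Set.mem_ofList] using hvQ)).symm
      · have hne : ¬ ((u == t) = true) := by simpa using hut
        simp only [Function.comp, hne]
        simp [List.filter_append,
          show ¬ (t == u) = true by simpa using fun h => hut (by simpa using h.symm)]
  · -- fresh key t
    have hcf : d.contains t = false := by simpa using hc
    have htK : t ∉ PySem.List.dedup (Q.map Prod.fst) := by
      rw [← hkeys]; intro hmm
      exact hc ((PySem.Dict.contains_iff_mem_keys _ _).mpr hmm)
    have hset : d.setdefault t [] = d.insert t [] :=
      PySem.Dict.setdefault_of_not_contains _ _ hcf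
    have hget : (d.insert t []).getD t [] = ([] : List String) :=
      PySem.Dict.getD_insert_self _ _ _ _
    rw [hset, hget]
    simp only [List.not_mem_nil, if_false, List.nil_append, PySem.Dict.insert_insert_self]
    rw [PySem.Dict.items_insert_of_not_contains _ _ hcf, hitems]
    have hkeys' : PySem.List.dedup ((Q ++ [(t, v)]).map Prod.fst)
        = PySem.List.dedup (Q.map Prod.fst) ++ [t] := by
      simp only [hfst, PySem.List.dedup_eq_ofList, PySem.Set.ofList_append_singleton]
      exact PySem.Set.add_of_not_mem (by simpa [PySem.List.dedup_eq_ofList] using htK)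
    simp only [pvSpec]
    rw [hkeys', List.map_append]
    simp only [List.map_cons, List.map_nil]
    congr 1
    · refine List.map_congr_left (fun u hu => ?_)
      have hut : u ≠ t := fun h => htK (h ▸ hu)
      congr 2
      simp [List.filter_append,
        show ¬ (t == u) = true by simpa using fun h => hut (by simpa using h.symm)]
    · have hfil : (Q.filter (fun q => q.1 == t)) = [] := by
        rw [List.filter_eq_nil_iff]
        intro q hq hbe
        exact htK (by
          simp only [PySem.List.dedup_eq_ofList, PySem.Set.mem_ofList]
          exact List.mem_map.mpr ⟨q, hq, by simpa using hbe⟩)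
      simp [hfil, PySem.List.dedup, PySem.Set.ofList]

theorem pvFoldSpec (P : List (String × String)) :
    (P.foldl pvPairStep PySem.Dict.empty).items = pvSpec (P.filter (fun q => !(q.2 == ""))) := by
  induction P using List.reverseRecOn with
  | nil => simp [pvSpec, PySem.Dict.empty, PySem.List.dedup, PySem.Set.ofList]
  | append_singleton Q p ih =>
      rw [List.foldl_append, List.foldl_cons, List.foldl_nil, List.filter_append]
      by_cases hv : p.2 = ""
      · simp only [List.filter_cons, hv]
        simpa [pvPairStep, hv] using ih
      · simp only [List.filter_cons, List.filter_nil]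
        have := pvStep (Q.filter (fun q => !(q.2 == ""))) p.1 p.2 hv _ ih
        simpa [hv] using this

-- ===== VERDICT (by name: the statement is the Claim_ definition above) =====
theorem extract_iocs_py_spec : Claim_equal_extract_iocs_py := by
  intro findings _
  unfold Spec_extract_iocs_py extract_iocs_py extract_iocs_py_alt
  rw [pvFoldFlat]
  have h2 : ∀ L : List (List (String × String)),
      L.foldl pvAStep PySem.Dict.empty = (L.map pvTV).foldl pvPairStep PySem.Dict.empty := by
    intro L; rw [List.foldl_map]; rfl
  rw [h2, pvFoldSpec, pvFilterMap_eq]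
  rfl
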